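-- pv_equiv track=rewrite | github.com/dxj711/lyricalVideo | main.py | _pick_best_lrclib_candidate
-- ===== SOURCE A (Python) =====
-- from typing import List, Optional, Tuple
--
-- def _pick_best_lrclib_candidate(
--     candidates: List[dict],
--     song_name: str,
--     preferred_title: Optional[str] = None,
--     preferred_artist: Optional[str] = None,
-- ) -> Optional[dict]:
--     """Pick best lrclib match, preferring exact title+artist, then exact title, then first result."""
--     if not candidates:
--         return None
--     if preferred_title and preferred_artist:
--         t = preferred_title.strip().lower()
--         a = preferred_artist.strip().lower()
--         for item in candidates:
--             track_name = str(item.get("trackName", "")).strip().lower()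
--             artist_name = str(item.get("artistName", "")).strip().lower()
--             if track_name == t and artist_name == a:
--                 return item
--
--     if preferred_title:
--         t = preferred_title.strip().lower()
--         for item in candidates:
--             track_name = str(item.get("trackName", "")).strip().lower()
--             if track_name == t:
--                 return item
--
--     target_lower = song_name.strip().lower()
--     for item in candidates:
--         track_name = str(item.get("trackName", "")).strip().lower()
--         if track_name == target_lower:
--             return item
--     return candidates[0]
-- ===== SOURCE B (Python) =====
-- def _pick_best_lrclib_candidate(candidates, song_name, preferred_title=None, preferred_artist=None):
--     """Single pass: rank every candidate (0 = title+artist match, 1 = title match,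
--     2 = song-name match, 3 = no match) and keep the first strictly-best one."""
--     if not candidates:
--         return None
--     t = preferred_title.strip().lower() if preferred_title else None
--     a = preferred_artist.strip().lower() if (preferred_title and preferred_artist) else None
--     target = song_name.strip().lower()
--
--     def rank(item):
--         track = str(item.get("trackName", "")).strip().lower()
--         if t is not None:
--             if a is not None and track == t and str(item.get("artistName", "")).strip().lower() == a:
--                 return 0
--             if track == t:
--                 return 1
--         if track == target:
--             return 2
--         return 3
--
--     best, best_rank = candidates[0], rank(candidates[0])
--     for item in candidates[1:]:
--         r = rank(item)
--         if r < best_rank: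
--             best, best_rank = item, r
--     return best
-- ===== Notes on version B (the rewrite author's own statement) =====
-- stated objective: simpler
-- what changed: Replaces A's three sequential scans (title+artist, title, song-name) by a single pass that ranks each candidate 0-3 and keeps the first candidate with the strictly lowest rank, falling back to candidates[0] when everything ranks 3.
import Mathlib
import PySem

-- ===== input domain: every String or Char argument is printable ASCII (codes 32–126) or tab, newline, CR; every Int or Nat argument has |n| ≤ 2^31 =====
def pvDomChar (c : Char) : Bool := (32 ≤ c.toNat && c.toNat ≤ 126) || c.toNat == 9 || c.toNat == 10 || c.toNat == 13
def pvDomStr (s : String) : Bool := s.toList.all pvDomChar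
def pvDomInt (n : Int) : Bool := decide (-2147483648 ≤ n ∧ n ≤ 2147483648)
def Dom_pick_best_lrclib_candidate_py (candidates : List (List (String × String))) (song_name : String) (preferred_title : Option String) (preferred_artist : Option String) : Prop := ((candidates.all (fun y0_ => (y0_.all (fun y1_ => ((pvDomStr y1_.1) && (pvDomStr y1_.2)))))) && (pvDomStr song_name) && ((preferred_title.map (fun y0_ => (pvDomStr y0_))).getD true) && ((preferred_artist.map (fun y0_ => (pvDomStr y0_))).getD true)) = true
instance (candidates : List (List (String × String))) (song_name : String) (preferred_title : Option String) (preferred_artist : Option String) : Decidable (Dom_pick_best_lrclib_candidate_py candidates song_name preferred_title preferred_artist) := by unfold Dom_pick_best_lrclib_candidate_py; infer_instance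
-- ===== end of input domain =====

-- ===== PORT A =====
-- B replaces A's three sequential scans by one ranked pass; objective: simpler.
-- shared helper: str(item.get(k, "")).strip().lower()  (str() is the identity on str)
def pvNormField (item : List (String × String)) (k : String) : String :=
  PySem.Str.lower (PySem.Str.strip (PySem.Dict.getD (PySem.Dict.mk item) k ""))

-- port of A: 'if not candidates' is the emptiness test; each 'for … return item' loop is
-- List.find?, and falling through a loop into the next block is Option.or; the truthiness
-- test 'if preferred_title' on an Optional[str] is 'getD "" ≠ ""' (None and "" are falsy);
-- the final 'candidates[0]' (guarded nonempty) is headD [].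
def pick_best_lrclib_candidate_py (candidates : List (List (String × String))) (song_name : String) (preferred_title : Option String) (preferred_artist : Option String) : Option (List (String × String)) :=
  if candidates = [] then none
  else
    (if preferred_title.getD "" ≠ "" ∧ preferred_artist.getD "" ≠ "" then
       candidates.find? (fun item =>
         pvNormField item "trackName" == PySem.Str.lower (PySem.Str.strip (preferred_title.getD ""))
           && pvNormField item "artistName" == PySem.Str.lower (PySem.Str.strip (preferred_artist.getD "")))
     else none).or
    ((if preferred_title.getD "" ≠ "" then
        candidates.find? (fun item =>
          pvNormField item "trackName" == PySem.Str.lower (PySem.Str.strip (preferred_title.getD "")))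
      else none).or
     ((candidates.find? (fun item =>
         pvNormField item "trackName" == PySem.Str.lower (PySem.Str.strip song_name))).or
      (some (candidates.headD []))))

-- ===== PORT B =====
-- rank of one candidate, exactly Source B's rank(): 0 title+artist match, 1 title match,
-- 2 song-name match, 3 otherwise
def pvRank (t? a? : Option String) (target : String) (item : List (String × String)) : Nat :=
  match t? with
  | some t =>
    if (match a? with
        | some a => pvNormField item "trackName" == t && pvNormField item "artistName" == a
        | none => false) then 0
    else if pvNormField item "trackName" == t then 1
    else if pvNormField item "trackName" == target then 2
    else 3
  | none => if pvNormField item "trackName" == target then 2 else 3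

-- Source B's t / a / target / rank, bundled ('t = … if preferred_title else None', etc.)
def pvRankOf (preferred_title preferred_artist : Option String) (song_name : String) : List (String × String) → Nat :=
  pvRank
    (if preferred_title.getD "" ≠ "" then some (PySem.Str.lower (PySem.Str.strip (preferred_title.getD ""))) else none)
    (if preferred_title.getD "" ≠ "" ∧ preferred_artist.getD "" ≠ "" then some (PySem.Str.lower (PySem.Str.strip (preferred_artist.getD ""))) else none)
    (PySem.Str.lower (PySem.Str.strip song_name))

-- port of B: best = candidates[0]; for item in candidates[1:]: keep item iff rank strictly drops
def pick_best_lrclib_candidate_py_alt (candidates : List (List (String × String))) (song_name : String) (preferred_title : Option String) (preferred_artist : Option String) : Option (List (String × String)) :=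
  if candidates = [] then none
  else
    some (candidates.tail.foldl
      (fun st item =>
        if pvRankOf preferred_title preferred_artist song_name item < st.2
        then (item, pvRankOf preferred_title preferred_artist song_name item) else st)
      (candidates.headD [], pvRankOf preferred_title preferred_artist song_name (candidates.headD []))).1

-- ===== PRECONDITION & SPEC =====
def Spec_pick_best_lrclib_candidate_py (candidates : List (List (String × String))) (song_name : String) (preferred_title : Option String) (preferred_artist : Option String) (out : Option (List (String × String))) : Prop := out = pick_best_lrclib_candidate_py_alt candidates song_name preferred_title preferred_artist
instance (candidates : List (List (String × String))) (song_name : String) (preferred_title : Option String) (preferred_artist : Option String) (out : Option (List (String × String))) : Decidable (Spec_pick_best_lrclib_candidate_py candidates song_name preferred_title preferred_artist out) := by unfold Spec_pick_best_lrclib_candidate_py; infer_instance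

-- ===== CLAIM (what is proved, stated in full; the proofs are below) =====
def Claim_equal_pick_best_lrclib_candidate_py : Prop := ∀ (candidates : List (List (String × String))) (song_name : String) (preferred_title : Option String) (preferred_artist : Option String), Dom_pick_best_lrclib_candidate_py candidates song_name preferred_title preferred_artist → Spec_pick_best_lrclib_candidate_py candidates song_name preferred_title preferred_artist (pick_best_lrclib_candidate_py candidates song_name preferred_title preferred_artist)

-- ===== LEMMAS AND PROOFS =====
def pvRank3 {α : Type} (p0 p1 p2 : α → Bool) (x : α) : Nat :=
  if p0 x then 0 else if p1 x then 1 else if p2 x then 2 else 3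

def pvChain {α : Type} (p0 p1 p2 : α → Bool) (l : List α) : Option α :=
  (l.find? p0).or ((l.find? p1).or ((l.find? p2).or l.head?))

def pvBest1 {α : Type} (rk : α → Nat) (b : α) : List α → α
  | [] => b
  | x :: xs => if rk x < rk b then pvBest1 rk x xs else pvBest1 rk b xs

theorem pvFold_eq_best1 {α : Type} (rk : α → Nat) (rest : List α) (c : α) :
    (rest.foldl (fun st item => if rk item < st.2 then (item, rk item) else st) (c, rk c)).1
      = pvBest1 rk c rest := by
  induction rest generalizing c with
  | nil => rfl
  | cons x xs ih =>
    simp only [List.foldl_cons, pvBest1]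
    by_cases h : rk x < rk c
    · simp [h, ih]
    · simp [h, ih]

theorem pvFind?_false {α : Type} (l : List α) : l.find? (fun _ => false) = none := by
  induction l with
  | nil => rfl
  | cons x xs ih => simp [List.find?, ih]

theorem pvChain_singleton {α : Type} (p0 p1 p2 : α → Bool) (c : α) :
    pvChain p0 p1 p2 [c] = some c := by
  unfold pvChain
  by_cases h0 : p0 c <;> by_cases h1 : p1 c <;> by_cases h2 : p2 c <;>
    simp [List.find?, h0, h1, h2]

theorem pvChain_cons_cons {α : Type} (p0 p1 p2 : α → Bool) (c x : α) (xs : List α) :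
    pvChain p0 p1 p2 (c :: x :: xs)
      = if pvRank3 p0 p1 p2 x < pvRank3 p0 p1 p2 c
        then pvChain p0 p1 p2 (x :: xs) else pvChain p0 p1 p2 (c :: xs) := by
  unfold pvChain pvRank3
  by_cases h0c : p0 c <;> by_cases h0x : p0 x <;>
    by_cases h1c : p1 c <;> by_cases h1x : p1 x <;>
    by_cases h2c : p2 c <;> by_cases h2x : p2 x <;>
    simp only [List.find?, h0c, h0x, h1c, h1x, h2c, h2x] <;> simp

theorem pvChain_eq_best1 {α : Type} (p0 p1 p2 : α → Bool) (xs : List α) (c : α) :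
    pvChain p0 p1 p2 (c :: xs) = some (pvBest1 (pvRank3 p0 p1 p2) c xs) := by
  induction xs generalizing c with
  | nil => simpa [pvBest1] using pvChain_singleton p0 p1 p2 c
  | cons x ys ih =>
    rw [pvChain_cons_cons]
    simp only [pvBest1]
    by_cases h : pvRank3 p0 p1 p2 x < pvRank3 p0 p1 p2 c
    · simp [h, ih]
    · simp [h, ih]

-- the two-tier and one-tier chains, with the missing tiers as the constantly-false predicate
theorem pvChain2_eq_best1 {α : Type} (p1 p2 : α → Bool) (xs : List α) (c : α) :
    ((c :: xs).find? p1).or (((c :: xs).find? p2).or (some c))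
      = some (pvBest1 (pvRank3 (fun _ => false) p1 p2) c xs) := by
  have h := pvChain_eq_best1 (fun _ => (false : Bool)) p1 p2 xs c
  simp only [pvChain, pvFind?_false, Option.none_or, List.head?_cons] at h
  exact h

theorem pvChain1_eq_best1 {α : Type} (p2 : α → Bool) (xs : List α) (c : α) :
    ((c :: xs).find? p2).or (some c)
      = some (pvBest1 (pvRank3 (fun _ => false) (fun _ => false) p2) c xs) := by
  have h := pvChain_eq_best1 (fun _ => (false : Bool)) (fun _ => (false : Bool)) p2 xs c
  simp only [pvChain, pvFind?_false, Option.none_or, List.head?_cons] at h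
  exact h

theorem pvChain3_eq_best1 {α : Type} (p0 p1 p2 : α → Bool) (xs : List α) (c : α) :
    ((c :: xs).find? p0).or (((c :: xs).find? p1).or (((c :: xs).find? p2).or (some c)))
      = some (pvBest1 (pvRank3 p0 p1 p2) c xs) := by
  have h := pvChain_eq_best1 p0 p1 p2 xs c
  simp only [pvChain, List.head?_cons] at h
  exact h

-- pvRank agrees with pvRank3 over the scenario predicates
theorem pvRank_none_none (target : String) :
    pvRank none none target
      = pvRank3 (fun _ => false) (fun _ => false)
          (fun item => pvNormField item "trackName" == target) := by
  funext item; simp [pvRank, pvRank3]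

theorem pvRank_some_none (t target : String) :
    pvRank (some t) none target
      = pvRank3 (fun _ => false)
          (fun item => pvNormField item "trackName" == t)
          (fun item => pvNormField item "trackName" == target) := by
  funext item; simp [pvRank, pvRank3]

theorem pvRank_some_some (t a target : String) :
    pvRank (some t) (some a) target
      = pvRank3
          (fun item => pvNormField item "trackName" == t && pvNormField item "artistName" == a)
          (fun item => pvNormField item "trackName" == t)
          (fun item => pvNormField item "trackName" == target) := by
  funext item; simp [pvRank, pvRank3]

-- ===== VERDICT (by name: the statement is the Claim_ definition above) =====
theorem pick_best_lrclib_candidate_py_spec : Claim_equal_pick_best_lrclib_candidate_py := by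
  intro candidates song_name preferred_title preferred_artist _hDom
  unfold Spec_pick_best_lrclib_candidate_py
  unfold pick_best_lrclib_candidate_py pick_best_lrclib_candidate_py_alt pvRankOf
  cases candidates with
  | nil => rfl
  | cons c rest =>
    rw [if_neg (List.cons_ne_nil c rest), if_neg (List.cons_ne_nil c rest)]
    simp only [List.headD_cons, List.tail_cons]
    by_cases h1 : preferred_title.getD "" = ""
    · -- preferred_title falsy: only the song-name scan runs, rank compares only tier 2
      rw [if_neg (fun hc => hc.1 h1), if_neg (fun hc => hc h1), if_neg (fun hc => hc h1),
        if_neg (fun hc => hc.1 h1)]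
      simp only [Option.none_or]
      rw [pvRank_none_none, pvFold_eq_best1]
      exact pvChain1_eq_best1 _ rest c
    · by_cases h2 : preferred_artist.getD "" = ""
      · -- title truthy, artist falsy: title scan then song-name scan
        rw [if_neg (fun hc => hc.2 h2), if_pos h1, if_pos h1, if_neg (fun hc => hc.2 h2)]
        simp only [Option.none_or]
        rw [pvRank_some_none, pvFold_eq_best1]
        exact pvChain2_eq_best1 _ _ rest c
      · -- both truthy: all three scans
        rw [if_pos (And.intro h1 h2), if_pos h1, if_pos h1, if_pos (And.intro h1 h2)]
        rw [pvRank_some_some, pvFold_eq_best1]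
        exact pvChain3_eq_best1 _ _ _ rest c
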